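-- pv_equiv track=rewrite | github.com/DatTwenty3/qgis_export_gdb_helper | HoSoGIS_import_cad.py | _restore_layer_name
-- ===== SOURCE A (Python) =====
-- def _restore_layer_name(cad_layer_str: str, dxf_full_layer_names):
--     if not dxf_full_layer_names:
--         return cad_layer_str
--
--     # 1) Nếu trùng đúng với tên trong DXF thì dùng luôn
--     if cad_layer_str in dxf_full_layer_names:
--         return cad_layer_str
--
--     # 2) Nếu cad_layer_str là tiền tố của đúng 1 tên đầy đủ -> khôi phục
--     matches = [n for n in dxf_full_layer_names if n.startswith(cad_layer_str)]
--     if len(matches) == 1: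
--         return matches[0]
--
--     # 3) Fallback: theo prefix 10 ký tự (chỉ khi duy nhất)
--     key10 = cad_layer_str[:10]
--     matches10 = [n for n in dxf_full_layer_names if n.startswith(key10)]
--     if len(matches10) == 1:
--         return matches10[0]
--
--     return cad_layer_str
-- ===== SOURCE B (Python) =====
-- def _restore_layer_name(cad_layer_str: str, dxf_full_layer_names):
--     if not dxf_full_layer_names:
--         return cad_layer_str
--
--     key10 = cad_layer_str[:10]
--     exact = False
--     first_pref = None
--     n_pref = 0
--     first_k10 = None
--     n_k10 = 0
--     # one pass instead of a membership test plus two filtering scans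
--     for n in dxf_full_layer_names:
--         if n == cad_layer_str:
--             exact = True
--         if n.startswith(cad_layer_str):
--             if n_pref == 0:
--                 first_pref = n
--             n_pref += 1
--         if n.startswith(key10):
--             if n_k10 == 0:
--                 first_k10 = n
--             n_k10 += 1
--
--     if exact:
--         return cad_layer_str
--     if n_pref == 1:
--         return first_pref
--     if n_k10 == 1:
--         return first_k10
--     return cad_layer_str
-- ===== Notes on version B (the rewrite author's own statement) =====
-- stated objective: alternative
-- what changed: One pass over dxf_full_layer_names maintaining an exact-match flag and the count/first element of the prefix and key10 matches, replacing A's membership test plus two separate filtering scans; the priority-ordered decision is made once after the loop.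
import Mathlib
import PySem

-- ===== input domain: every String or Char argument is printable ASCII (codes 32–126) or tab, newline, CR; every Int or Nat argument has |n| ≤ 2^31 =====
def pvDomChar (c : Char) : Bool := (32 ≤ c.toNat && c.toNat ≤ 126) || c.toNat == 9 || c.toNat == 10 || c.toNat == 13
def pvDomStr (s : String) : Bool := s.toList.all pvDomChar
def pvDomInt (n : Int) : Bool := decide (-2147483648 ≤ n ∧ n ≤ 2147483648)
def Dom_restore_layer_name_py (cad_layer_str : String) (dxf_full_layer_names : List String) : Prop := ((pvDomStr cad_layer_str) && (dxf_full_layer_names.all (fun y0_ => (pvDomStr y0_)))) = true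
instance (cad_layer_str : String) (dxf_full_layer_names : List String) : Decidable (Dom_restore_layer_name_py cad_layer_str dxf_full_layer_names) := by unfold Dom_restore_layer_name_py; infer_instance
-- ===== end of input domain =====

-- B replaces A's membership test plus two separate filtering scans with one fused pass
-- maintaining an exact-match flag and the count/first element of each match class (alternative decomposition, same cost class).

-- ===== PORT A =====
def restore_layer_name_py (cad_layer_str : String) (dxf_full_layer_names : List String) : String :=
  if dxf_full_layer_names = [] then cad_layer_str
  else if cad_layer_str ∈ dxf_full_layer_names then cad_layer_str
  else
    let matchesA := dxf_full_layer_names.filter (fun n => PySem.Str.startswith n cad_layer_str)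
    if matchesA.length = 1 then (PySem.List.pyGet? matchesA (0 : Int)).getD cad_layer_str  -- matchesA[0]; length = 1 so pyGet? is some
    else
      let key10 := PySem.Str.slice cad_layer_str none (some 10)
      let matchesA10 := dxf_full_layer_names.filter (fun n => PySem.Str.startswith n key10)
      if matchesA10.length = 1 then (PySem.List.pyGet? matchesA10 (0 : Int)).getD cad_layer_str
      else cad_layer_str

-- ===== PORT B =====
structure RlnState where
  exact : Bool
  firstPref : Option String
  nPref : Nat
  firstK10 : Option String
  nK10 : Nat
deriving DecidableEq, Repr

def rlnStep (cad key10 : String) (s : RlnState) (n : String) : RlnState :=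
  let s := if n = cad then { s with exact := true } else s
  let s := if PySem.Str.startswith n cad then
             { s with firstPref := if s.nPref = 0 then some n else s.firstPref, nPref := s.nPref + 1 }
           else s
  if PySem.Str.startswith n key10 then
    { s with firstK10 := if s.nK10 = 0 then some n else s.firstK10, nK10 := s.nK10 + 1 }
  else s

def restore_layer_name_py_alt (cad_layer_str : String) (dxf_full_layer_names : List String) : String :=
  if dxf_full_layer_names = [] then cad_layer_str
  else
    let key10 := PySem.Str.slice cad_layer_str none (some 10)
    let st := dxf_full_layer_names.foldl (rlnStep cad_layer_str key10) ⟨false, none, 0, none, 0⟩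
    if st.exact then cad_layer_str
    else if st.nPref = 1 then st.firstPref.getD cad_layer_str
    else if st.nK10 = 1 then st.firstK10.getD cad_layer_str
    else cad_layer_str

-- ===== PRECONDITION & SPEC =====
def Spec_restore_layer_name_py (cad_layer_str : String) (dxf_full_layer_names : List String) (out : String) : Prop := out = restore_layer_name_py_alt cad_layer_str dxf_full_layer_names
instance (cad_layer_str : String) (dxf_full_layer_names : List String) (out : String) : Decidable (Spec_restore_layer_name_py cad_layer_str dxf_full_layer_names out) := by unfold Spec_restore_layer_name_py; infer_instance

-- ===== CLAIM (what is proved, stated in full; the proofs are below) =====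
def Claim_equal_restore_layer_name_py : Prop := ∀ (cad_layer_str : String) (dxf_full_layer_names : List String), Dom_restore_layer_name_py cad_layer_str dxf_full_layer_names → Spec_restore_layer_name_py cad_layer_str dxf_full_layer_names (restore_layer_name_py cad_layer_str dxf_full_layer_names)

-- ===== LEMMAS AND PROOFS =====

-- the fused fold computes: the membership flag, and length/head of both filtered lists
theorem rln_fold (cad key10 : String) (l : List String) (s : RlnState) :
    l.foldl (rlnStep cad key10) s =
      { exact := s.exact || l.contains cad,
        firstPref := if s.nPref = 0 then ((l.filter (fun n => PySem.Str.startswith n cad)).head?).or s.firstPref else s.firstPref,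
        nPref := s.nPref + (l.filter (fun n => PySem.Str.startswith n cad)).length,
        firstK10 := if s.nK10 = 0 then ((l.filter (fun n => PySem.Str.startswith n key10)).head?).or s.firstK10 else s.firstK10,
        nK10 := s.nK10 + (l.filter (fun n => PySem.Str.startswith n key10)).length } := by
  induction l generalizing s with
  | nil => simp
  | cons n t ih =>
    rcases s with ⟨e, fp, np, fk, nk⟩
    simp only [List.foldl_cons]
    rw [ih]
    unfold rlnStep
    by_cases h1 : n = cad
    · subst h1
      by_cases h2 : PySem.Chars.startswith n.toList n.toList = true <;>
        by_cases h3 : PySem.Chars.startswith n.toList key10.toList = true <;>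
          simp [h2, h3, Option.or] <;>
          try omega
    · have hce : ¬ cad = n := fun h => h1 h.symm
      have hcn : (cad == n) = false := by
        simp [beq_eq_false_iff_ne]; exact hce
      by_cases h2 : PySem.Chars.startswith n.toList cad.toList = true <;>
        by_cases h3 : PySem.Chars.startswith n.toList key10.toList = true <;>
          simp [h1, h2, h3, hce, Option.or] <;>
          try omega

theorem restore_layer_name_py_eq (cad : String) (names : List String) :
    restore_layer_name_py cad names = restore_layer_name_py_alt cad names := by
  unfold restore_layer_name_py restore_layer_name_py_alt
  by_cases hnil : names = []
  · simp [hnil]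
  · simp only [hnil, if_false]
    rw [rln_fold]
    by_cases hmem : cad ∈ names
    · simp [hmem]
    · have hc : names.contains cad = false := by
        simp [hmem]
      simp only [hmem, if_false, hc, Bool.false_or, if_false]
      by_cases h1 : (names.filter (fun n => PySem.Str.startswith n cad)).length = 1
      · obtain ⟨m, hm⟩ := List.length_eq_one_iff.mp h1
        have hm' : names.filter (fun n => PySem.Chars.startswith n.toList cad.toList) = [m] := by
          simpa using hm
        have hf : names.find? (fun n => PySem.Chars.startswith n.toList cad.toList) = some m := by
          rw [← List.head?_filter, hm']; rfl
        simp [hm', PySem.List.pyGet?, PySem.List.pyIdx?]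
      · simp only [h1, if_false]
        by_cases h2 : (names.filter (fun n => PySem.Str.startswith n (PySem.Str.slice cad none (some 10)))).length = 1
        · obtain ⟨m, hm⟩ := List.length_eq_one_iff.mp h2
          have hm' : names.filter (fun n => PySem.Chars.startswith n.toList (PySem.List.slice cad.toList none (some 10))) = [m] := by
            simpa using hm
          have hf : names.find? (fun n => PySem.Chars.startswith n.toList (PySem.List.slice cad.toList none (some 10))) = some m := by
            rw [← List.head?_filter, hm']; rfl
          have h1' : ¬ (names.filter (fun n => PySem.Chars.startswith n.toList cad.toList)).length = 1 := by
            intro h; exact h1 (by simpa using h)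
          simp [h1', hm', PySem.List.pyGet?, PySem.List.pyIdx?]
        · have h1' : ¬ (names.filter (fun n => PySem.Chars.startswith n.toList cad.toList)).length = 1 := by
            intro h; exact h1 (by simpa using h)
          have h2' : ¬ (names.filter (fun n => PySem.Chars.startswith n.toList (PySem.List.slice cad.toList none (some 10)))).length = 1 := by
            intro h; exact h2 (by simpa using h)
          simp [h1', h2']

-- ===== VERDICT (by name: the statement is the Claim_ definition above) =====
theorem restore_layer_name_py_spec : Claim_equal_restore_layer_name_py := by
  intro cad names _
  exact restore_layer_name_py_eq cad names
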